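-- pv_equiv track=rewrite | github.com/icdev-ai/icdev | tools/compliance/sbd_report_generator.py | _build_findings_table
-- ===== SOURCE A (Python) =====
-- SBD_DOMAINS = [
--     "Authentication",
--     "Memory Safety",
--     "Vulnerability Management",
--     "Intrusion Evidence",
--     "Cryptography",
--     "Access Control",
--     "Input Handling",
--     "Error Handling",
--     "Supply Chain",
--     "Threat Modeling",
--     "Defense in Depth",
--     "Secure Defaults",
--     "CUI Compliance",
--     "DoD Software Assurance",
-- ]
--
-- def _build_findings_table(assessments):
--     """Build a table of not_satisfied requirements grouped by domain.
--
--     Lists all findings that are not satisfied, ordered by domain then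
--     requirement ID.
--     """
--     findings = [
--         a for a in assessments if a.get("status") == "not_satisfied"
--     ]
--     if not findings:
--         return "*No findings requiring remediation.*"
--
--     lines = [
--         "| Domain | Requirement ID | Evidence | Notes |",
--         "|--------|----------------|----------|-------|",
--     ]
--     for domain in SBD_DOMAINS:
--         domain_findings = [f for f in findings if f.get("domain") == domain]
--         for f in sorted(domain_findings, key=lambda x: x.get("requirement_id", "")):
--             evidence = (f.get("evidence_description") or "").replace("\n", " ").strip()
--             notes = (f.get("notes") or "").replace("\n", " ").strip()
--             if len(evidence) > 60:
--                 evidence = evidence[:57] + "..."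
--             if len(notes) > 60:
--                 notes = notes[:57] + "..."
--             lines.append(
--                 f"| {domain} | {f.get('requirement_id', 'N/A')} "
--                 f"| {evidence} | {notes} |"
--             )
--
--     return "\n".join(lines)
-- ===== SOURCE B (Python) =====
-- SBD_DOMAINS = [
--     "Authentication",
--     "Memory Safety",
--     "Vulnerability Management",
--     "Intrusion Evidence",
--     "Cryptography",
--     "Access Control",
--     "Input Handling",
--     "Error Handling",
--     "Supply Chain",
--     "Threat Modeling",
--     "Defense in Depth",
--     "Secure Defaults",
--     "CUI Compliance",
--     "DoD Software Assurance",
-- ]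
--
--
-- def _build_findings_table(assessments):
--     """Build a table of not_satisfied requirements grouped by domain.
--
--     Single stable sort on (domain rank, requirement ID) instead of a
--     per-domain rescan of the findings list.
--     """
--     findings = [a for a in assessments if a.get("status") == "not_satisfied"]
--     if not findings:
--         return "*No findings requiring remediation.*"
--
--     rank = {d: i for i, d in enumerate(SBD_DOMAINS)}
--     rows = sorted(
--         [f for f in findings if f.get("domain") in rank],
--         key=lambda f: (rank[f.get("domain")], f.get("requirement_id", "")),
--     )
--
--     lines = [
--         "| Domain | Requirement ID | Evidence | Notes |",
--         "|--------|----------------|----------|-------|",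
--     ]
--     for f in rows:
--         evidence = (f.get("evidence_description") or "").replace("\n", " ").strip()
--         notes = (f.get("notes") or "").replace("\n", " ").strip()
--         if len(evidence) > 60:
--             evidence = evidence[:57] + "..."
--         if len(notes) > 60:
--             notes = notes[:57] + "..."
--         lines.append(
--             f"| {f.get('domain')} | {f.get('requirement_id', 'N/A')} "
--             f"| {evidence} | {notes} |"
--         )
--
--     return "\n".join(lines)
-- ===== Notes on version B (the rewrite author's own statement) =====
-- stated objective: alternative
-- what changed: Replaces the 14-domain rescan-and-per-bucket-sort with a domain->rank index plus one combined stable sort on (rank, requirement_id), emitted in a single pass.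
import Mathlib
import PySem

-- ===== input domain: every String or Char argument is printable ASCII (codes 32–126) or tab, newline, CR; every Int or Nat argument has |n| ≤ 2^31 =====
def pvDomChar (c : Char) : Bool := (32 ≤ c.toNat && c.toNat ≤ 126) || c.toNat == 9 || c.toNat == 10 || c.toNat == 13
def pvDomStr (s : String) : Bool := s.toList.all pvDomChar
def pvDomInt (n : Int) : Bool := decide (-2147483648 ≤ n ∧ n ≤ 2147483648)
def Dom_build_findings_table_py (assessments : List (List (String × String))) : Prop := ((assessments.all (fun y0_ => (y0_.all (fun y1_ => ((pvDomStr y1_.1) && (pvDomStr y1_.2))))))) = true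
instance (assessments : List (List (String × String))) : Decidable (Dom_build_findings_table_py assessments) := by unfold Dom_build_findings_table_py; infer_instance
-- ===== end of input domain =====

-- B replaces A's 14-domain rescan-and-per-bucket-sort by a domain->rank index and ONE combined
-- stable sort on (rank, requirement_id); same output (alternative decomposition, no speed claim).

-- ===== PORT A =====
def SBD_DOMAINS : List String :=
  ["Authentication", "Memory Safety", "Vulnerability Management", "Intrusion Evidence",
   "Cryptography", "Access Control", "Input Handling", "Error Handling", "Supply Chain",
   "Threat Modeling", "Defense in Depth", "Secure Defaults", "CUI Compliance",
   "DoD Software Assurance"]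

-- d.get(k): first-match lookup in the association list (Python dict)
def pvGet (a : List (String × String)) (k : String) : Option String :=
  (PySem.Dict.mk a).get? k

-- (v or "").replace("\n", " ").strip(), then the 60/57 truncation; '' is the only falsy str,
-- so `v or ""` is exactly `v.getD ""`.
def pvCell (v : Option String) : String :=
  let s := PySem.Str.strip (PySem.Str.replace (v.getD "") "\n" " ")
  if 60 < PySem.Str.len s then PySem.Str.slice s none (some 57) ++ "..." else s

-- A's row f-string: domain comes from the loop variable
def pvRowA (domain : String) (f : List (String × String)) : String :=
  "| " ++ domain ++ " | " ++ (pvGet f "requirement_id").getD "N/A" ++ " | " ++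
    pvCell (pvGet f "evidence_description") ++ " | " ++ pvCell (pvGet f "notes") ++ " |"

def build_findings_table_py (assessments : List (List (String × String))) : String :=
  let findings := assessments.filter (fun a => pvGet a "status" == some "not_satisfied")
  if findings.isEmpty then "*No findings requiring remediation.*" else
  let lines := ["| Domain | Requirement ID | Evidence | Notes |",
                "|--------|----------------|----------|-------|"]
  let lines := SBD_DOMAINS.foldl (fun lines domain =>
    let domain_findings := findings.filter (fun f => pvGet f "domain" == some domain)
    (PySem.List.sorted domain_findings (fun x => (pvGet x "requirement_id").getD "")).foldl
      (fun lines f => lines ++ [pvRowA domain f]) lines) lines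
  PySem.Str.join "\n" lines

-- ===== PORT B =====
-- rank = {d: i for i, d in enumerate(SBD_DOMAINS)}
def pvRank : PySem.Dict String Int :=
  (PySem.List.enumerate SBD_DOMAINS 0).foldl (fun d p => d.insert p.2 p.1) PySem.Dict.empty

-- B's row f-string: domain comes from the finding itself (str(None) = "None" for the
-- unreachable missing-domain case, as in Python)
def pvRowB (f : List (String × String)) : String :=
  "| " ++ (pvGet f "domain").getD "None" ++ " | " ++ (pvGet f "requirement_id").getD "N/A" ++ " | " ++
    pvCell (pvGet f "evidence_description") ++ " | " ++ pvCell (pvGet f "notes") ++ " |"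

def build_findings_table_py_alt (assessments : List (List (String × String))) : String :=
  let findings := assessments.filter (fun a => pvGet a "status" == some "not_satisfied")
  if findings.isEmpty then "*No findings requiring remediation.*" else
  let rows := PySem.List.sorted2
      (findings.filter (fun f => match pvGet f "domain" with
                                 | some d => pvRank.contains d
                                 | none => false))
      (fun f => match pvGet f "domain" with
                | some d => pvRank.getD d 0
                | none => 0)
      (fun f => (pvGet f "requirement_id").getD "")
  PySem.Str.join "\n"
    (["| Domain | Requirement ID | Evidence | Notes |",
      "|--------|----------------|----------|-------|"] ++ rows.map pvRowB)

-- ===== PRECONDITION & SPEC =====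
def Spec_build_findings_table_py (assessments : List (List (String × String))) (out : String) : Prop := out = build_findings_table_py_alt assessments
instance (assessments : List (List (String × String))) (out : String) : Decidable (Spec_build_findings_table_py assessments out) := by unfold Spec_build_findings_table_py; infer_instance

-- ===== CLAIM (what is proved, stated in full; the proofs are below) =====
def Claim_equal_build_findings_table_py : Prop := ∀ (assessments : List (List (String × String))), Dom_build_findings_table_py assessments → Spec_build_findings_table_py assessments (build_findings_table_py assessments)

-- ===== LEMMAS AND PROOFS =====

-- proof-side abbreviations for B's sort predicates and A's per-domain groups
def pvKey2 (f : List (String × String)) : String := (pvGet f "requirement_id").getD ""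

def pvK1 (f : List (String × String)) : Int :=
  match pvGet f "domain" with | some d => pvRank.getD d 0 | none => 0

def pvQ (f : List (String × String)) : Bool :=
  match pvGet f "domain" with | some d => pvRank.contains d | none => false

def pvB (f g : List (String × String)) : Bool :=
  decide (pvK1 f < pvK1 g) || (!decide (pvK1 g < pvK1 f) && decide (pvKey2 f < pvKey2 g))

def pvB2 (f g : List (String × String)) : Bool := decide (pvKey2 f < pvKey2 g)

def pvGroup (F : List (List (String × String))) (d : String) : List (List (String × String)) :=
  PySem.List.sorted (F.filter (fun f => pvGet f "domain" == some d)) pvKey2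

theorem pv_keys_rank : pvRank.keys = SBD_DOMAINS := by decide

theorem pv_pairwise_rank :
    SBD_DOMAINS.Pairwise (fun a b => pvRank.getD a 0 < pvRank.getD b 0) := by decide

theorem pv_mem_of_contains {d : String} (h : pvRank.contains d = true) : d ∈ SBD_DOMAINS := by
  rw [← pv_keys_rank]; exact (PySem.Dict.contains_iff_mem_keys pvRank d).mp h

theorem pv_contains_of_mem {d : String} (h : d ∈ SBD_DOMAINS) : pvRank.contains d = true := by
  exact (PySem.Dict.contains_iff_mem_keys pvRank d).mpr (pv_keys_rank ▸ h)

-- generic insertBy facts about my two comparison functions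
theorem pv_insertBy_congr {a : Type} (b b' : a → a → Bool) (x : a) (ys : List a)
    (h : ∀ y ∈ ys, b x y = b' x y) :
    PySem.List.insertBy b x ys = PySem.List.insertBy b' x ys := by
  induction ys with
  | nil => rfl
  | cons y ys ih =>
    simp only [PySem.List.insertBy, h y (List.mem_cons_self)]
    split
    · rfl
    · rw [ih (fun z hz => h z (List.mem_cons_of_mem _ hz))]

theorem pv_insertBy_append_all {a : Type} (b : a → a → Bool) (x : a) (ys zs : List a)
    (h : ∀ z ∈ zs, b x z = true) :
    PySem.List.insertBy b x (ys ++ zs) = PySem.List.insertBy b x ys ++ zs := by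
  induction ys with
  | nil =>
    cases zs with
    | nil => rfl
    | cons z zs =>
      simp only [List.nil_append, PySem.List.insertBy, h z (List.mem_cons_self)]
      rfl
  | cons y ys ih =>
    simp only [List.cons_append, PySem.List.insertBy]
    split
    · rfl
    · rw [ih]; rfl

theorem pv_insertBy_append_none {a : Type} (b : a → a → Bool) (x : a) (ys zs : List a)
    (h : ∀ y ∈ ys, b x y = false) :
    PySem.List.insertBy b x (ys ++ zs) = ys ++ PySem.List.insertBy b x zs := by
  induction ys with
  | nil => rfl
  | cons y ys ih =>
    simp only [List.cons_append, PySem.List.insertBy, h y (List.mem_cons_self)]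
    simp only [Bool.false_eq_true, if_false, List.cons_inj_right]
    exact ih (fun z hz => h z (List.mem_cons_of_mem _ hz))

-- inserting x (whose domain has rank r d0) into the rank-ordered concatenation of groups
theorem pv_insert_flatMap (x : List (String × String)) (d0 : String) (D : List String)
    (g : String → List (List (String × String)))
    (hmem : d0 ∈ D)
    (hD : D.Pairwise (fun a b => pvRank.getD a 0 < pvRank.getD b 0))
    (hkey : ∀ d ∈ D, ∀ y ∈ g d, pvK1 y = pvRank.getD d 0)
    (hx : pvK1 x = pvRank.getD d0 0) :
    PySem.List.insertBy pvB x (D.flatMap g)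
      = D.flatMap (fun d => if d = d0 then PySem.List.insertBy pvB2 x (g d) else g d) := by
  induction D with
  | nil => cases hmem
  | cons d D' ih =>
    rw [List.pairwise_cons] at hD
    obtain ⟨hlt, hD'⟩ := hD
    by_cases hd : d = d0
    · subst hd
      -- x's group is first: all later groups compare strictly greater
      rw [List.flatMap_cons, List.flatMap_cons, if_pos rfl]
      have hall : ∀ z ∈ D'.flatMap g, pvB x z = true := by
        intro z hz
        obtain ⟨d', hd', hzg⟩ := List.mem_flatMap.mp hz
        have : pvK1 z = pvRank.getD d' 0 := hkey d' (List.mem_cons_of_mem _ hd') z hzg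
        simp only [pvB, this, hx]
        have := hlt d' hd'
        simp [this]
      have hcong : ∀ y ∈ g d, pvB x y = pvB2 x y := by
        intro y hy
        have : pvK1 y = pvRank.getD d 0 := hkey d List.mem_cons_self y hy
        simp [pvB, pvB2, this, hx]
      rw [pv_insertBy_append_all _ _ _ _ hall, pv_insertBy_congr _ _ _ _ hcong]
      have : D'.flatMap (fun d' => if d' = d then PySem.List.insertBy pvB2 x (g d') else g d')
          = D'.flatMap g := by
        apply List.flatMap_congr
        intro d' hd'
        have := hlt d' hd'
        rw [if_neg (by intro he; subst he; omega)]
      rw [this]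
    · -- x's group is further right: skip this group
      have hd0' : d0 ∈ D' := by
        cases List.mem_cons.mp hmem with
        | inl h => exact absurd h.symm hd
        | inr h => exact h
      rw [List.flatMap_cons, List.flatMap_cons, if_neg hd]
      have hnone : ∀ y ∈ g d, pvB x y = false := by
        intro y hy
        have hy1 : pvK1 y = pvRank.getD d 0 := hkey d List.mem_cons_self y hy
        have := hlt d0 hd0'
        simp [pvB, hy1, hx]
        constructor
        · omega
        · intro h; omega
      rw [pv_insertBy_append_none _ _ _ _ hnone,
        ih hd0' hD' (fun d' hd' y hy => hkey d' (List.mem_cons_of_mem _ hd') y hy)]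

-- B's single combined stable sort = concatenation of A's per-domain sorted groups
theorem pv_grouping (F : List (List (String × String))) :
    PySem.List.sorted2 (F.filter pvQ) pvK1 pvKey2
      = SBD_DOMAINS.flatMap (fun d => pvGroup F d) := by
  induction F using List.reverseRecOn with
  | nil => rfl
  | append_singleton F x ih =>
    have hs2 : ∀ (l : List (List (String × String))), PySem.List.sorted2 l pvK1 pvKey2
        = l.foldl (fun acc y => PySem.List.insertBy pvB y acc) [] := fun l => rfl
    have hs : ∀ (l : List (List (String × String))), PySem.List.sorted l pvKey2
        = l.foldl (fun acc y => PySem.List.insertBy pvB2 y acc) [] := fun l => rfl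
    rw [List.filter_append]
    by_cases hq : pvQ x = true
    · -- x survives B's domain filter: its domain is some d0 present in the rank index
      obtain ⟨d0, hgx, hc⟩ : ∃ d0, pvGet x "domain" = some d0 ∧ pvRank.contains d0 = true := by
        unfold pvQ at hq
        cases hg : pvGet x "domain" with
        | none => rw [hg] at hq; cases hq
        | some d0 => rw [hg] at hq; exact ⟨d0, rfl, hq⟩
      have hd0 : d0 ∈ SBD_DOMAINS := pv_mem_of_contains hc
      have hfx : List.filter pvQ [x] = [x] := by simp [hq]
      rw [hfx, hs2, List.foldl_append, ← hs2, ih, List.foldl_cons, List.foldl_nil]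
      rw [pv_insert_flatMap x d0 SBD_DOMAINS (pvGroup F) hd0 pv_pairwise_rank
        (by
          intro d _ y hy
          have hmem := (PySem.List.mem_sorted _ _ _ _).mp hy
          have := (List.mem_filter.mp hmem).2
          have hdom : pvGet y "domain" = some d := by simpa using this
          simp [pvK1, hdom])
        (by simp [pvK1, hgx])]
      apply List.flatMap_congr
      intro d hd
      unfold pvGroup
      rw [List.filter_append]
      by_cases hdd : d = d0
      · subst hdd
        have : List.filter (fun f => pvGet f "domain" == some d) [x] = [x] := by simp [hgx]
        rw [if_pos rfl, this,
          hs (List.filter (fun f => pvGet f "domain" == some d) F ++ [x]),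
          List.foldl_append, List.foldl_cons, List.foldl_nil, ← hs]
      · have : List.filter (fun f => pvGet f "domain" == some d) [x] = [] := by
          simp [hgx]; exact fun he => absurd he.symm hdd
        rw [if_neg hdd, this, List.append_nil]
    · -- x is filtered out on both sides
      have hfx : List.filter pvQ [x] = [] := by simp [hq]
      rw [hfx, List.append_nil, ih]
      apply List.flatMap_congr
      intro d hd
      unfold pvGroup
      rw [List.filter_append]
      have : List.filter (fun f => pvGet f "domain" == some d) [x] = [] := by
        simp only [Bool.not_eq_true] at hq
        unfold pvQ at hq
        cases hg : pvGet x "domain" with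
        | none => simp [hg]
        | some d' =>
          rw [hg] at hq
          simp [hg]
          intro he
          subst he
          exact absurd (pv_contains_of_mem hd) (by simp [hq])
      rw [this, List.append_nil]

theorem pv_Afold (F : List (List (String × String))) (D : List String) (init : List String) :
    D.foldl (fun lines domain =>
      (PySem.List.sorted (F.filter (fun f => pvGet f "domain" == some domain))
        (fun x => (pvGet x "requirement_id").getD "")).foldl
        (fun lines f => lines ++ [pvRowA domain f]) lines) init
    = init ++ D.flatMap (fun d => (pvGroup F d).map (pvRowA d)) := by
  induction D generalizing init with
  | nil => simp
  | cons d D' ih =>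
    rw [List.foldl_cons, PySem.List.foldl_append_singleton_eq_map, ih, List.flatMap_cons,
      List.append_assoc]
    rfl

theorem pv_row_eq {d : String} {f : List (String × String)}
    (h : pvGet f "domain" = some d) : pvRowB f = pvRowA d f := by
  simp [pvRowA, pvRowB, h]

-- ===== VERDICT (by name: the statement is the Claim_ definition above) =====
theorem build_findings_table_py_spec : Claim_equal_build_findings_table_py := by
  intro assessments _
  unfold Spec_build_findings_table_py build_findings_table_py build_findings_table_py_alt
  by_cases h : (assessments.filter (fun a => pvGet a "status" == some "not_satisfied")).isEmpty
  · simp only [h, if_true]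
  · simp only [h]
    refine congrArg (PySem.Str.join "\n") ?_
    rw [pv_Afold]
    have hmain : (PySem.List.sorted2 ((assessments.filter (fun a => pvGet a "status" == some "not_satisfied")).filter pvQ) pvK1 pvKey2).map pvRowB
        = SBD_DOMAINS.flatMap (fun d => (pvGroup (assessments.filter (fun a => pvGet a "status" == some "not_satisfied")) d).map (pvRowA d)) := by
      rw [pv_grouping, List.map_flatMap]
      apply List.flatMap_congr
      intro d hd
      apply List.map_congr_left
      intro y hy
      have hmem := (PySem.List.mem_sorted _ _ _ _).mp hy
      have hdom : pvGet y "domain" = some d := by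
        have := (List.mem_filter.mp hmem).2
        simpa using this
      exact pv_row_eq hdom
    exact congrArg (["| Domain | Requirement ID | Evidence | Notes |",
      "|--------|----------------|----------|-------|"] ++ ·) hmain.symm
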